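-- pv_equiv track=rewrite | github.com/esegarcia74/radicalgen | radicalgen.py | extract_root
-- ===== SOURCE A (Python) =====
-- def extract_root(n, index=2):
--     """Return (outside, inside) such that ⁿ√n = outside · ⁿ√(inside)."""
--     outside, inside = 1, n
--     for p in [2, 3, 5, 7, 11, 13, 17, 19, 23, 29, 31, 37, 41, 43, 47]:
--         pk = p ** index
--         while inside % pk == 0:
--             outside *= p
--             inside  //= pk
--     return outside, inside
-- ===== SOURCE B (Python) =====
-- _PRIMES = [2, 3, 5, 7, 11, 13, 17, 19, 23, 29, 31, 37, 41, 43, 47]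
--
--
-- def _valuation(m, p):
--     """Multiplicity of p in m (m != 0)."""
--     c = 0
--     while m % p == 0:
--         m //= p
--         c += 1
--     return c
--
--
-- def extract_root(n, index=2):
--     """Return (outside, inside) such that ⁿ√n = outside · ⁿ√(inside)."""
--     outside = 1
--     for p in _PRIMES:
--         power = _valuation(n, p) // index
--         outside *= p ** power
--         n //= p ** (index * power)
--     return outside, n
-- ===== Notes on version B (the rewrite author's own statement) =====
-- stated objective: faster
-- what changed: For each prime, B computes the full p-adic valuation with a separate divide-by-p helper and extracts outside/inside with one power and one exact division (power = valuation // index), instead of A's loop of repeated big-integer divisions by p**index.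
-- outside the precondition, e.g. on extract_root(22, -26): A returns (1099511627776, inf), B does not finish within the time limit; on extract_root(72, 0): A does not finish within the time limit, B raises ZeroDivisionError
import Mathlib
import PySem

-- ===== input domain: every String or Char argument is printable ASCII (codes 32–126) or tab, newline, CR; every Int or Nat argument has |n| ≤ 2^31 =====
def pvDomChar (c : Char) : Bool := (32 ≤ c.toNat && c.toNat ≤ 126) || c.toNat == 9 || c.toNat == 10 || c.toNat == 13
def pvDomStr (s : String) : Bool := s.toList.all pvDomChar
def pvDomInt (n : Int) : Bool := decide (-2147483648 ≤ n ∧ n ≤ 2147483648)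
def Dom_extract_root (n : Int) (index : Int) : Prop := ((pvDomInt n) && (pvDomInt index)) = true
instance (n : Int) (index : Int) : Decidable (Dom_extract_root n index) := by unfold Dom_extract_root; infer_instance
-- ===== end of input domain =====

-- B replaces A's interleaved repeated division by p**index with one valuation pass per prime
-- followed by a single arithmetic extraction (alternative decomposition, same cost class).

-- the fixed prime list both Pythons iterate over
def pvPrimes : List Int := [2, 3, 5, 7, 11, 13, 17, 19, 23, 29, 31, 37, 41, 43, 47]

-- ===== PORT A =====
-- the 'while inside % pk == 0' loop; fuel (natAbs inside + 1) only makes it total,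
-- it is never exhausted on Pre_ inputs (each iteration shrinks |inside| by a factor ≥ 2)
def pvALoop (p pk : Int) : Nat → Int → Int → Int × Int
  | 0, o, i => (o, i)
  | f + 1, o, i =>
    if PySem.Int.mod i pk = 0 then pvALoop p pk f (o * p) (PySem.Int.floordiv i pk)
    else (o, i)

-- 'p ** index' : exact for index ≥ 1 (Pre_); toNat only totalises the excluded index ≤ 0
def extract_root (n : Int) (index : Int) : Int × Int :=
  pvPrimes.foldl
    (fun st p =>
      let pk := p ^ index.toNat
      pvALoop p pk (st.2.natAbs + 1) st.1 st.2)
    (1, n)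

-- ===== PORT B =====
-- the 'while m % p == 0: m //= p; c += 1' valuation loop (fuel as in pvALoop)
def pvCount (p : Int) : Nat → Int → Int
  | 0, _ => 0
  | f + 1, m =>
    if PySem.Int.mod m p = 0 then pvCount p f (PySem.Int.floordiv m p) + 1
    else 0

def extract_root_alt (n : Int) (index : Int) : Int × Int :=
  pvPrimes.foldl
    (fun st p =>
      let c := pvCount p (st.2.natAbs + 1) st.2
      let power := PySem.Int.floordiv c index
      (st.1 * p ^ power.toNat,
       PySem.Int.floordiv st.2 (p ^ (index * power).toNat)))
    (1, n)

-- ===== PRECONDITION & SPEC =====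
-- Pre_ excludes n == 0 and index <= 0: A loops forever when n == 0 or index == 0, and for
-- negative index A's 'p ** index' is a float, so A returns a float pair, not a pair of ints.
def Pre_extract_root (n : Int) (index : Int) : Prop := n ≠ 0 ∧ 1 ≤ index
instance (n : Int) (index : Int) : Decidable (Pre_extract_root n index) := by
  unfold Pre_extract_root; infer_instance

def pvWitness_extract_root : Int × Int := (72, 2)

def Spec_extract_root (n : Int) (index : Int) (out : Int × Int) : Prop := out = extract_root_alt n index
instance (n : Int) (index : Int) (out : Int × Int) : Decidable (Spec_extract_root n index out) := by unfold Spec_extract_root; infer_instance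

-- ===== CLAIM (what is proved, stated in full; the proofs are below) =====
def Claim_equal_extract_root : Prop := ∀ (n : Int) (index : Int), Dom_extract_root n index → Pre_extract_root n index → Spec_extract_root n index (extract_root n index)

-- ===== LEMMAS AND PROOFS =====

-- p^j ∣ i iff j ≤ c, when c is the exact multiplicity of p in i
theorem pv_pow_dvd_iff_le (p i : Int) (c : Nat)
    (hc : p ^ c ∣ i ∧ ¬ p ^ (c + 1) ∣ i) (j : Nat) : p ^ j ∣ i ↔ j ≤ c := by
  constructor
  · intro h
    by_contra hlt
    exact hc.2 (dvd_trans (pow_dvd_pow p (by omega)) h)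
  · intro h
    exact dvd_trans (pow_dvd_pow p h) hc.1

-- pvCount, given enough fuel, returns the exact multiplicity of p in i
theorem pvCount_spec (p : Int) (hp : 2 ≤ p) :
    ∀ (f : Nat) (i : Int), i ≠ 0 → i.natAbs ≤ f →
      ∃ c : Nat, pvCount p f i = (c : Int) ∧ p ^ c ∣ i ∧ ¬ p ^ (c + 1) ∣ i := by
  intro f
  induction f with
  | zero => intro i hi hle; exact absurd (Int.natAbs_eq_zero.mp (by omega)) hi
  | succ f ih =>
    intro i hi hle
    by_cases hdvd : p ∣ i
    · have hmod : PySem.Int.mod i p = 0 := (PySem.Int.mod_eq_zero_iff_dvd i p).mpr hdvd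
      have hfd : PySem.Int.floordiv i p = i / p := PySem.Int.floordiv_eq_ediv_of_pos (by omega)
      have heq : p * (i / p) = i := Int.mul_ediv_cancel' hdvd
      have hi' : i / p ≠ 0 := by
        intro h0; rw [h0, mul_zero] at heq; exact hi heq.symm
      have habs : (i / p).natAbs < i.natAbs := by
        have := congrArg Int.natAbs heq
        rw [Int.natAbs_mul] at this
        have hp2 : 2 ≤ p.natAbs := by omega
        have hpos : 0 < (i / p).natAbs := Int.natAbs_pos.mpr hi'
        nlinarith
      obtain ⟨c, hc1, hc2, hc3⟩ := ih (i / p) hi' (by omega)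
      refine ⟨c + 1, ?_, ?_, ?_⟩
      · simp only [pvCount, hmod, if_true, hfd, hc1]; push_cast; ring
      · rw [← heq, pow_succ, mul_comm (p^c) p]
        exact mul_dvd_mul_left p hc2
      · intro hbad
        rw [← heq] at hbad
        rw [pow_succ'] at hbad
        exact hc3 ((mul_dvd_mul_iff_left (a := p) (by omega : p ≠ 0)).mp hbad)
    · have hmod : PySem.Int.mod i p ≠ 0 := by
        intro h; exact hdvd ((PySem.Int.mod_eq_zero_iff_dvd i p).mp h)
      refine ⟨0, ?_, by simp, by simpa using hdvd⟩
      simp [pvCount, hmod]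

-- A's inner loop, with multiplicity c and exponent e ≥ 1, extracts k = c / e copies of p
theorem pvALoop_spec (p : Int) (hp : 2 ≤ p) (e : Nat) (he : 1 ≤ e) :
    ∀ (f : Nat) (i : Int), i ≠ 0 → ∀ (c : Nat), (p ^ c ∣ i ∧ ¬ p ^ (c + 1) ∣ i) →
      i.natAbs ≤ f → ∀ (o : Int),
        pvALoop p (p ^ e) f o i = (o * p ^ (c / e), PySem.Int.floordiv i (p ^ (e * (c / e)))) := by
  intro f
  induction f with
  | zero => intro i hi _ _ hle _; exact absurd (Int.natAbs_eq_zero.mp (by omega)) hi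
  | succ f ih =>
    intro i hi c hc hle o
    have hppos : (0:Int) < p ^ e := by positivity
    by_cases hdvd : p ^ e ∣ i
    · have hec : e ≤ c := (pv_pow_dvd_iff_le p i c hc e).mp hdvd
      have hk1 : 1 ≤ c / e := (Nat.one_le_div_iff (by omega)).mpr hec
      have hmod : PySem.Int.mod i (p ^ e) = 0 := (PySem.Int.mod_eq_zero_iff_dvd i (p^e)).mpr hdvd
      have hfd : PySem.Int.floordiv i (p ^ e) = i / p ^ e := PySem.Int.floordiv_eq_ediv_of_pos hppos
      set i' := i / p ^ e with hi'def
      have heq : p ^ e * i' = i := Int.mul_ediv_cancel' hdvd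
      have hi' : i' ≠ 0 := by
        intro h0; rw [h0, mul_zero] at heq; exact hi heq.symm
      have habs : i'.natAbs < i.natAbs := by
        have := congrArg Int.natAbs heq
        rw [Int.natAbs_mul] at this
        have hp2 : 2 ≤ (p ^ e).natAbs := by
          have h2pe : (2:Int) ≤ p ^ e := by
            calc (2:Int) ≤ p := hp
            _ = p ^ 1 := (pow_one p).symm
            _ ≤ p ^ e := pow_le_pow_right₀ (by omega) he
          omega
        have hpos : 0 < i'.natAbs := Int.natAbs_pos.mpr hi'
        nlinarith
      have hc' : p ^ (c - e) ∣ i' ∧ ¬ p ^ (c - e + 1) ∣ i' := by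
        constructor
        · have hdc : p ^ e * p ^ (c - e) ∣ i := by
            rw [← pow_add]
            have hee : e + (c - e) = c := by omega
            rw [hee]; exact hc.1
          rw [← heq] at hdc
          exact (mul_dvd_mul_iff_left (a := p ^ e) (by positivity)).mp hdc
        · intro hbad
          have hdc : p ^ e * p ^ (c - e + 1) ∣ p ^ e * i' := mul_dvd_mul_left _ hbad
          rw [← pow_add, heq] at hdc
          have hee : e + (c - e + 1) = c + 1 := by omega
          rw [hee] at hdc
          exact hc.2 hdc
      have hsub : (c - e) / e = c / e - 1 := by
        have hds := Nat.div_eq_sub_div (show 0 < e by omega) hec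
        omega
      have hstep : pvALoop p (p ^ e) (f + 1) o i = pvALoop p (p ^ e) f (o * p) i' := by
        simp [pvALoop, hmod, hfd]
      rw [hstep, ih i' hi' (c - e) hc' (by omega) (o * p), hsub]
      set k := c / e with hk
      have hdvdk : p ^ (e * k) ∣ i :=
        (pv_pow_dvd_iff_le p i c hc (e * k)).mpr (by
          rw [mul_comm]; exact Nat.div_mul_le_self c e)
      obtain ⟨t, ht⟩ := hdvdk
      have hsplit : e * k = e + e * (k - 1) := by
        have hk' : k = 1 + (k - 1) := by omega
        calc e * k = e * (1 + (k - 1)) := by rw [← hk']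
        _ = e + e * (k - 1) := by ring
      have hi'eq : i' = p ^ (e * (k - 1)) * t := by
        rw [hi'def, ht, hsplit, pow_add, mul_assoc, Int.mul_ediv_cancel_left _ (by positivity)]
      have hcomp1 : o * p * p ^ (k - 1) = o * p ^ k := by
        rw [mul_assoc, ← pow_succ']
        congr 2
        omega
      have hcomp2 : PySem.Int.floordiv i' (p ^ (e * (k - 1))) = PySem.Int.floordiv i (p ^ (e * k)) := by
        rw [PySem.Int.floordiv_eq_ediv_of_pos (by positivity),
            PySem.Int.floordiv_eq_ediv_of_pos (by positivity), hi'eq, ht,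
            Int.mul_ediv_cancel_left _ (by positivity), Int.mul_ediv_cancel_left _ (by positivity)]
      rw [hcomp1, hcomp2]
    · have hec : c < e := by
        by_contra hge
        exact hdvd ((pv_pow_dvd_iff_le p i c hc e).mpr (by omega))
      have hk0 : c / e = 0 := Nat.div_eq_of_lt hec
      have hmod : PySem.Int.mod i (p ^ e) ≠ 0 := by
        intro h; exact hdvd ((PySem.Int.mod_eq_zero_iff_dvd i (p^e)).mp h)
      simp [pvALoop, hmod, hk0]

-- one prime step of A equals one prime step of B
theorem pv_step_eq (p : Int) (hp : 2 ≤ p) (index : Int) (hidx : 1 ≤ index)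
    (o i : Int) (hi : i ≠ 0) :
    pvALoop p (p ^ index.toNat) (i.natAbs + 1) o i =
    (o * p ^ (PySem.Int.floordiv (pvCount p (i.natAbs + 1) i) index).toNat,
     PySem.Int.floordiv i (p ^ (index * PySem.Int.floordiv (pvCount p (i.natAbs + 1) i) index).toNat)) := by
  obtain ⟨c, hc1, hc2, hc3⟩ := pvCount_spec p hp (i.natAbs + 1) i hi (by omega)
  set e := index.toNat with he
  have hidxe : index = (e : Int) := by omega
  have he1 : 1 ≤ e := by omega
  rw [pvALoop_spec p hp e he1 (i.natAbs + 1) i hi c ⟨hc2, hc3⟩ (by omega) o,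
      hc1, hidxe, PySem.Int.floordiv_natCast, ← Nat.cast_mul, Int.toNat_natCast, Int.toNat_natCast]

-- the 'inside' accumulator stays nonzero across a prime step
theorem pv_step_ne_zero (p : Int) (hp : 2 ≤ p) (index : Int) (hidx : 1 ≤ index)
    (o i : Int) (hi : i ≠ 0) :
    (pvALoop p (p ^ index.toNat) (i.natAbs + 1) o i).2 ≠ 0 := by
  obtain ⟨c, hc1, hc2, hc3⟩ := pvCount_spec p hp (i.natAbs + 1) i hi (by omega)
  set e := index.toNat with he
  have he1 : 1 ≤ e := by omega
  rw [pvALoop_spec p hp e he1 (i.natAbs + 1) i hi c ⟨hc2, hc3⟩ (by omega) o]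
  have hdvdk : p ^ (e * (c / e)) ∣ i :=
    (pv_pow_dvd_iff_le p i c ⟨hc2, hc3⟩ (e * (c / e))).mpr (by
      rw [mul_comm]; exact Nat.div_mul_le_self c e)
  have heq : p ^ (e * (c / e)) * (i / p ^ (e * (c / e))) = i := Int.mul_ediv_cancel' hdvdk
  simp only [PySem.Int.floordiv_eq_ediv_of_pos (show (0:Int) < p ^ (e * (c / e)) by positivity)]
  intro h0
  rw [h0, mul_zero] at heq
  exact hi heq.symm

theorem pv_fold_eq (index : Int) (hidx : 1 ≤ index) :
    ∀ (l : List Int), (∀ p ∈ l, 2 ≤ p) → ∀ (o i : Int), i ≠ 0 →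
      l.foldl (fun st p =>
        let pk := p ^ index.toNat
        pvALoop p pk (st.2.natAbs + 1) st.1 st.2) (o, i) =
      l.foldl (fun st p =>
        let c := pvCount p (st.2.natAbs + 1) st.2
        let power := PySem.Int.floordiv c index
        (st.1 * p ^ power.toNat, PySem.Int.floordiv st.2 (p ^ (index * power).toNat))) (o, i) := by
  intro l
  induction l with
  | nil => intro _ o i _; rfl
  | cons p l ih =>
    intro hall o i hi
    have hp2 : 2 ≤ p := hall p (List.mem_cons_self)
    rw [List.foldl_cons, List.foldl_cons]
    have hA : (let pk := p ^ index.toNat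
        pvALoop p pk (((o, i) : Int × Int).2.natAbs + 1) ((o, i) : Int × Int).1 ((o, i) : Int × Int).2)
        = pvALoop p (p ^ index.toNat) (i.natAbs + 1) o i := rfl
    have hB : (let c := pvCount p (((o, i) : Int × Int).2.natAbs + 1) ((o, i) : Int × Int).2
        let power := PySem.Int.floordiv c index
        (((o, i) : Int × Int).1 * p ^ power.toNat, PySem.Int.floordiv ((o, i) : Int × Int).2 (p ^ (index * power).toNat)))
        = pvALoop p (p ^ index.toNat) (i.natAbs + 1) o i :=
      (pv_step_eq p hp2 index hidx o i hi).symm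
    rw [hA, hB]
    have hne := pv_step_ne_zero p hp2 index hidx o i hi
    have hfold := ih (fun q hq => hall q (List.mem_cons_of_mem p hq))
      (pvALoop p (p ^ index.toNat) (i.natAbs + 1) o i).1
      (pvALoop p (p ^ index.toNat) (i.natAbs + 1) o i).2 hne
    simpa using hfold

-- ===== VERDICT (by name: the statement is the Claim_ definition above) =====
theorem extract_root_spec : Claim_equal_extract_root := by
  intro n index _ hpre
  unfold Spec_extract_root extract_root extract_root_alt
  exact pv_fold_eq index hpre.2 pvPrimes (by decide) 1 n hpre.1
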